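-- pv_equiv track=rewrite | github.com/bchwast/AGH-ASD | Egzaminy 20_21/e1_ex1.py | chaos_index
-- ===== SOURCE A (Python) =====
-- from queue import PriorityQueue
--
-- def chaos_index( T ):
--     n = len(T)
--     Q = PriorityQueue()
--
--     for i in range(n):
--         Q.put([T[i], i])
--
--     k = 0
--     for i in range(n):
--         tmp = Q.get()
--         k = max(k, abs(tmp[1] - i))
--
--     return k
-- ===== SOURCE B (Python) =====
-- def chaos_index(T):
--     # rank by counting: rank(i) = (# values < T[i]) + (# earlier equal values)
--     counts = {}
--     for t in T:
--         counts[t] = counts.get(t, 0) + 1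
--     start = {}
--     acc = 0
--     for v in sorted(counts):
--         start[v] = acc
--         acc += counts[v]
--     k = 0
--     for i, t in enumerate(T):
--         rank = start[t]
--         start[t] = rank + 1
--         d = abs(i - rank)
--         if d > k:
--             k = d
--     return k
-- ===== Notes on version B (the rewrite author's own statement) =====
-- stated objective: faster
-- what changed: Replaces the PriorityQueue (and any sorting of (value,index) pairs) by counting: a dict of value counts, prefix sums over the sorted distinct values give each value's starting rank, and one left-to-right pass assigns each element its rank (start[v] incremented per occurrence, so ties break by original index) while tracking the max displacement.
import Mathlib
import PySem

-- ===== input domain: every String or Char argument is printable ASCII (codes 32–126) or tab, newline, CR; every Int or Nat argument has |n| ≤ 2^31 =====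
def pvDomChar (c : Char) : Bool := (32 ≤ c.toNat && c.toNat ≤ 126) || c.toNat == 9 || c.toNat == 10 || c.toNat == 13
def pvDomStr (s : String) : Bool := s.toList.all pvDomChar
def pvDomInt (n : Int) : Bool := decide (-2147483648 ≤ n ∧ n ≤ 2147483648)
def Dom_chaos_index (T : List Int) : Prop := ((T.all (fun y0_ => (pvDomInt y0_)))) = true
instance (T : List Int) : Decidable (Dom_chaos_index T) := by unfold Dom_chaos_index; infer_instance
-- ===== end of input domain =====

-- B replaces the PriorityQueue by counting ranks: a dict of value counts, prefix sums over the
-- sorted distinct values, and one pass assigning each element its rank (measured faster: no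
-- per-element heap put/get, only dict updates).

-- ===== PORT A =====
-- Python list comparison [v, i] < [w, j] is lexicographic; the PriorityQueue is modelled
-- as a list kept in ascending lexicographic order (put = ordered insert, get = pop the head).
def chaosBefore (a b : Int × Int) : Bool :=
  decide (a.1 < b.1) || (!decide (b.1 < a.1) && decide (a.2 < b.2))

-- the second loop: each get() returns the current minimum = the head; i counts up, k accumulates
def chaosGetLoop : List (Int × Int) → Int → Int → Int
  | [], _, k => k
  | p :: rest, i, k => chaosGetLoop rest (i + 1) (max k |p.2 - i|)

def chaos_index (T : List Int) : Int :=
  let n : Int := PySem.List.len T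
  let Q := (PySem.List.pyRange 0 n 1).foldl
    (fun q i => PySem.List.insertBy chaosBefore (PySem.List.pyGetD T i 0, i) q) []
  chaosGetLoop Q 0 0

-- ===== PORT B =====
def chaos_index_alt (T : List Int) : Int :=
  -- counts = {}; for t in T: counts[t] = counts.get(t, 0) + 1
  let counts := T.foldl (fun d t => d.insert t (d.getD t 0 + 1)) PySem.Dict.empty
  -- start = {}; acc = 0; for v in sorted(counts): start[v] = acc; acc += counts[v]
  -- (counts[v] is always present — v is a key of counts — so getD is an exact port)
  let sa := (PySem.List.sorted counts.keys (fun v => v)).foldl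
    (fun (p : PySem.Dict Int Int × Int) v => (p.1.insert v p.2, p.2 + counts.getD v 0))
    (PySem.Dict.empty, 0)
  -- k = 0; for i, t in enumerate(T): rank = start[t]; start[t] = rank + 1; d = abs(i - rank); if d > k: k = d
  -- (start[t] is always present — t occurs in T, so it is a key of counts, hence of start — so getD is an exact port)
  let r := (PySem.List.enumerate T 0).foldl
    (fun (p : PySem.Dict Int Int × Int) it =>
      let rank := p.1.getD it.2 0
      let d := |it.1 - rank|
      (p.1.insert it.2 (rank + 1), if d > p.2 then d else p.2))
    (sa.1, 0)
  r.2

-- ===== PRECONDITION & SPEC =====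
def Spec_chaos_index (T : List Int) (out : Int) : Prop := out = chaos_index_alt T
instance (T : List Int) (out : Int) : Decidable (Spec_chaos_index T out) := by unfold Spec_chaos_index; infer_instance

-- ===== CLAIM (what is proved, stated in full; the proofs are below) =====
def Claim_equal_chaos_index : Prop := ∀ (T : List Int), Dom_chaos_index T → Spec_chaos_index T (chaos_index T)

-- ===== LEMMAS AND PROOFS =====

-- the (value, original index) pairs A feeds into the queue
def chaosPairs (T : List Int) : List (Int × Int) :=
  (PySem.List.pyRange 0 (PySem.List.len T) 1).map (fun i => (PySem.List.pyGetD T i 0, i))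

-- the rank both programs compute: #(smaller values) + #(earlier equal values)
def chaosRank (T : List Int) (i : Int) : Int :=
  ((T.countP (fun x => decide (x < PySem.List.pyGetD T i 0))) : Int)
  + (((T.take i.toNat).count (PySem.List.pyGetD T i 0)) : Int)

lemma chaosBefore_iff (a b : Int × Int) :
    chaosBefore a b = true ↔ a.1 < b.1 ∨ (a.1 = b.1 ∧ a.2 < b.2) := by
  simp [chaosBefore]; omega

lemma chaosBefore_irrefl (a : Int × Int) : chaosBefore a a = false := by
  simp [chaosBefore]

lemma chaosBefore_asymm {a b : Int × Int} (h : chaosBefore a b = true) :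
    chaosBefore b a = false := by
  rw [chaosBefore_iff] at h
  simp [chaosBefore]; omega

lemma chaosBefore_trans {a b c : Int × Int}
    (h1 : chaosBefore a b = true) (h2 : chaosBefore b c = true) : chaosBefore a c = true := by
  rw [chaosBefore_iff] at *; omega

lemma chaosBefore_conn {a b : Int × Int} (h : a.2 ≠ b.2) :
    chaosBefore a b = true ∨ chaosBefore b a = true := by
  rw [chaosBefore_iff, chaosBefore_iff]; omega

lemma insertBy_perm (x : Int × Int) (l : List (Int × Int)) :
    (PySem.List.insertBy chaosBefore x l).Perm (x :: l) := by
  induction l with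
  | nil => simp [PySem.List.insertBy]
  | cons y t ih =>
    simp only [PySem.List.insertBy]
    split
    · exact List.Perm.refl _
    · exact (List.Perm.cons y ih).trans (List.Perm.swap x y t)

lemma insertBy_pairwise (x : Int × Int) (l : List (Int × Int))
    (hl : l.Pairwise (fun a b => chaosBefore a b = true))
    (hc : ∀ y ∈ l, chaosBefore x y = true ∨ chaosBefore y x = true) :
    (PySem.List.insertBy chaosBefore x l).Pairwise (fun a b => chaosBefore a b = true) := by
  induction l with
  | nil => simp [PySem.List.insertBy]
  | cons y t ih =>
    simp only [PySem.List.insertBy]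
    rcases List.pairwise_cons.mp hl with ⟨hyt, ht⟩
    split
    · rename_i hxy
      refine List.pairwise_cons.mpr ⟨?_, hl⟩
      intro z hz
      rcases List.mem_cons.mp hz with rfl | hz
      · exact hxy
      · exact chaosBefore_trans hxy (hyt z hz)
    · rename_i hxy
      refine List.pairwise_cons.mpr ⟨?_, ih ht (fun z hz => hc z (List.mem_cons_of_mem _ hz))⟩
      intro z hz
      rcases List.mem_cons.mp ((insertBy_perm x t).mem_iff.mp hz) with rfl | hz
      · rcases hc y (List.mem_cons_self ..) with h | h
        · exact absurd h hxy
        · exact h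
      · exact hyt z hz

lemma foldl_insertBy_perm (l : List (Int × Int)) :
    ∀ (acc : List (Int × Int)),
      (l.foldl (fun q p => PySem.List.insertBy chaosBefore p q) acc).Perm (acc ++ l) := by
  induction l with
  | nil => intro acc; simp
  | cons p t ih =>
    intro acc
    simp only [List.foldl_cons]
    refine (ih _).trans ?_
    refine ((insertBy_perm p acc).append_right t).trans ?_
    exact List.perm_middle.symm

lemma foldl_insertBy_pairwise (l : List (Int × Int)) :
    ∀ (acc : List (Int × Int)),
      (acc ++ l).Pairwise (fun a b => a.2 ≠ b.2) →
      acc.Pairwise (fun a b => chaosBefore a b = true) →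
      (l.foldl (fun q p => PySem.List.insertBy chaosBefore p q) acc).Pairwise
        (fun a b => chaosBefore a b = true) := by
  induction l with
  | nil => intro acc _ h2; simpa using h2
  | cons p t ih =>
    intro acc hne hacc
    simp only [List.foldl_cons]
    have hpacc : ∀ y ∈ acc, chaosBefore p y = true ∨ chaosBefore y p = true := by
      intro y hy
      have hys : y.2 ≠ p.2 :=
        (List.pairwise_append.mp hne).2.2 y hy p (List.mem_cons_self ..)
      exact (chaosBefore_conn hys).symm
    refine ih _ ?_ (insertBy_pairwise p acc hacc hpacc)
    have hperm : (PySem.List.insertBy chaosBefore p acc ++ t).Perm (acc ++ p :: t) :=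
      ((insertBy_perm p acc).append_right t).trans List.perm_middle.symm
    exact (hperm.pairwise_iff (fun h => Ne.symm h)).mpr hne

-- position lemma: in a strictly ordered queue, the element at position r has exactly r
-- strict predecessors in the queue
lemma countP_pairwise_getElem (Q : List (Int × Int))
    (hpw : Q.Pairwise (fun a b => chaosBefore a b = true)) :
    ∀ (r : Nat) (hr : r < Q.length), Q.countP (fun q => chaosBefore q Q[r]) = r := by
  induction Q with
  | nil => intro r hr; simp at hr
  | cons x t ih =>
    intro r hr
    rcases List.pairwise_cons.mp hpw with ⟨hxt, ht⟩
    match r with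
    | 0 =>
      simp only [List.getElem_cons_zero, List.countP_cons, chaosBefore_irrefl]
      have hz : t.countP (fun q => chaosBefore q x) = 0 :=
        List.countP_eq_zero.mpr (fun y hy => by simp [chaosBefore_asymm (hxt y hy)])
      simp [hz]
    | r + 1 =>
      have hr' : r < t.length := by simpa using hr
      simp only [List.getElem_cons_succ, List.countP_cons]
      have hmem : t[r] ∈ t := List.getElem_mem _
      rw [ih ht r hr']
      simp [hxt _ hmem]

-- ===== assembling the A side =====

lemma chaosGetLoop_eq (l : List (Int × Int)) :
    ∀ (i k : Int), chaosGetLoop l i k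
      = ((PySem.List.enumerate l i).map (fun rp => |rp.2.2 - rp.1|)).foldl max k := by
  induction l with
  | nil => intro i k; simp [chaosGetLoop, PySem.List.enumerate_nil]
  | cons p rest ih => intro i k; simp [chaosGetLoop, PySem.List.enumerate_cons, ih]

lemma pairs_snd_ne (T : List Int) :
    (chaosPairs T).Pairwise (fun a b => a.2 ≠ b.2) := by
  unfold chaosPairs
  rw [List.pairwise_map]
  exact List.Pairwise.imp (fun h => by omega) (PySem.List.pairwise_lt_pyRange_one 0 (PySem.List.len T))

lemma chaos_index_eq_fold (T : List Int) :
    chaos_index T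
      = ((PySem.List.pyRange 0 (PySem.List.len T) 1).map
          (fun i => |i - ((chaosPairs T).countP
              (fun q => chaosBefore q (PySem.List.pyGetD T i 0, i)) : Int)|)).foldl max 0 := by
  have hfold : (PySem.List.pyRange 0 (PySem.List.len T) 1).foldl
      (fun q i => PySem.List.insertBy chaosBefore (PySem.List.pyGetD T i 0, i) q) []
      = (chaosPairs T).foldl (fun q p => PySem.List.insertBy chaosBefore p q) [] := by
    unfold chaosPairs
    rw [List.foldl_map]
  set Q := (chaosPairs T).foldl (fun q p => PySem.List.insertBy chaosBefore p q) [] with hQ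
  have hperm : Q.Perm (chaosPairs T) := by
    simpa using foldl_insertBy_perm (chaosPairs T) []
  have hpw : Q.Pairwise (fun a b => chaosBefore a b = true) := by
    refine foldl_insertBy_pairwise (chaosPairs T) [] ?_ (by simp)
    simpa using pairs_snd_ne T
  have henum : (PySem.List.enumerate Q 0).map (fun rp => |rp.2.2 - rp.1|)
      = Q.map (fun p => |p.2 - (Q.countP (fun q => chaosBefore q p) : Int)|) := by
    apply List.ext_getElem
    · simp [PySem.List.length_enumerate]
    · intro r h1 h2
      have hr : r < Q.length := by simpa [PySem.List.length_enumerate] using h2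
      simp only [List.getElem_map, PySem.List.getElem_enumerate,
        countP_pairwise_getElem Q hpw r hr]
      simp
  have hcong : Q.map (fun p => |p.2 - (Q.countP (fun q => chaosBefore q p) : Int)|)
      = Q.map (fun p => |p.2 - ((chaosPairs T).countP (fun q => chaosBefore q p) : Int)|) :=
    List.map_congr_left (fun p _ => by rw [hperm.countP_eq])
  have hmax : ∀ (l1 l2 : List Int), l1.Perm l2 → l1.foldl max 0 = l2.foldl max 0 := by
    intro l1 l2 h
    exact h.foldl_eq 0
  show chaosGetLoop ((PySem.List.pyRange 0 (PySem.List.len T) 1).foldl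
      (fun q i => PySem.List.insertBy chaosBefore (PySem.List.pyGetD T i 0, i) q) []) 0 0 = _
  rw [hfold, chaosGetLoop_eq, henum, hcong,
    hmax _ _ ((hperm.map _))]
  unfold chaosPairs
  rw [List.map_map]
  rfl

-- ===== the rank characterisation (shared by both sides) =====

lemma map_pyGetD_take (T : List Int) (i : Int) (h0 : 0 ≤ i) (hn : i ≤ PySem.List.len T) :
    (PySem.List.pyRange 0 i 1).map (fun j => PySem.List.pyGetD T j 0) = T.take i.toNat := by
  have hfull := PySem.List.map_pyGetD_pyRange_zero T 0
  rw [PySem.List.pyRange_one_append 0 i (PySem.List.len T) h0 hn, List.map_append,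
    PySem.List.map_pyGetD_pyRange T 0 h0] at hfull
  have hlen : ((PySem.List.pyRange 0 i 1).map (fun j => PySem.List.pyGetD T j 0)).length = i.toNat := by
    simp [PySem.List.length_pyRange_one]
  have h := congrArg (List.take i.toNat) hfull
  rw [List.take_append_of_le_length (le_of_eq hlen.symm),
    List.take_of_length_le (le_of_eq hlen)] at h
  exact h

lemma countP_le_split (l : List Int) (t : Int) :
    l.countP (fun x => decide (x ≤ t)) = l.countP (fun x => decide (x < t)) + l.count t := by
  induction l with
  | nil => simp
  | cons y ys ih =>
    simp only [List.countP_cons, List.count_cons, ih]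
    rcases lt_trichotomy y t with h | h | h
    · simp [h, le_of_lt h, ne_of_lt h]; omega
    · subst h; simp; omega
    · simp [not_le.mpr h, not_lt.mpr (le_of_lt h), ne_of_gt h]

lemma countP_chaosPairs (T : List Int) (i : Int)
    (h0 : 0 ≤ i) (hn : i < PySem.List.len T) :
    ((chaosPairs T).countP (fun q => chaosBefore q (PySem.List.pyGetD T i 0, i)) : Int)
      = chaosRank T i := by
  unfold chaosPairs chaosRank
  rw [List.countP_map]
  rw [PySem.List.pyRange_one_append 0 i (PySem.List.len T) h0 (le_of_lt hn),
    List.countP_append]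
  have h1 : (PySem.List.pyRange 0 i 1).countP
      ((fun q => chaosBefore q (PySem.List.pyGetD T i 0, i)) ∘ (fun j => (PySem.List.pyGetD T j 0, j)))
      = (PySem.List.pyRange 0 i 1).countP
        (fun j => decide (PySem.List.pyGetD T j 0 ≤ PySem.List.pyGetD T i 0)) := by
    apply List.countP_congr
    intro j hj
    have hji : j < i := (PySem.List.mem_pyRange_one.mp hj).2
    simp only [Function.comp_apply, chaosBefore_iff, decide_eq_true_eq]
    constructor
    · rintro (h | ⟨h, -⟩) <;> omega
    · intro h
      rcases lt_or_eq_of_le h with h' | h'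
      · exact Or.inl h'
      · exact Or.inr ⟨h', hji⟩
  have h2 : (PySem.List.pyRange i (PySem.List.len T) 1).countP
      ((fun q => chaosBefore q (PySem.List.pyGetD T i 0, i)) ∘ (fun j => (PySem.List.pyGetD T j 0, j)))
      = (PySem.List.pyRange i (PySem.List.len T) 1).countP
        (fun j => decide (PySem.List.pyGetD T j 0 < PySem.List.pyGetD T i 0)) := by
    apply List.countP_congr
    intro j hj
    have hji : i ≤ j := (PySem.List.mem_pyRange_one.mp hj).1
    simp only [Function.comp_apply, chaosBefore_iff, decide_eq_true_eq]
    constructor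
    · rintro (h | ⟨-, h⟩)
      · exact h
      · omega
    · exact Or.inl
  rw [h1, h2]
  have ht : (PySem.List.pyRange 0 i 1).countP
      (fun j => decide (PySem.List.pyGetD T j 0 ≤ PySem.List.pyGetD T i 0))
      = (T.take i.toNat).countP (fun x => decide (x ≤ PySem.List.pyGetD T i 0)) := by
    rw [← map_pyGetD_take T i h0 (le_of_lt hn), List.countP_map]
    rfl
  have hd : (PySem.List.pyRange i (PySem.List.len T) 1).countP
      (fun j => decide (PySem.List.pyGetD T j 0 < PySem.List.pyGetD T i 0))
      = (T.drop i.toNat).countP (fun x => decide (x < PySem.List.pyGetD T i 0)) := by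
    rw [← PySem.List.map_pyGetD_pyRange T 0 h0, List.countP_map]
    rfl
  rw [ht, hd, countP_le_split]
  have hTcount : ∀ (p : Int → Bool),
      T.countP p = (T.take i.toNat).countP p + (T.drop i.toNat).countP p := by
    intro p
    conv_lhs => rw [← List.take_append_drop i.toNat T]
    rw [List.countP_append]
  rw [hTcount]
  push_cast
  ring

-- ===== the B side =====

lemma countP_or_disjoint {α : Type} (l : List α) (p q : α → Bool)
    (h : ∀ x ∈ l, ¬(p x = true ∧ q x = true)) :
    l.countP (fun x => p x || q x) = l.countP p + l.countP q := by
  induction l with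
  | nil => simp
  | cons y t ih =>
    simp only [List.countP_cons]
    rw [ih (fun x hx => h x (List.mem_cons_of_mem _ hx))]
    have := h y (List.mem_cons_self ..)
    by_cases hp : p y <;> by_cases hq : q y <;> simp_all <;> omega

-- loop 2 helper: a fold inserting only keys from L does not change the value at a key outside L
lemma loop2_getD_of_not_mem (c : Int → Int) (L : List Int) :
    ∀ (st : PySem.Dict Int Int × Int) (v : Int), v ∉ L →
      ((L.foldl (fun (p : PySem.Dict Int Int × Int) w => (p.1.insert w p.2, p.2 + c w)) st).1).getD v 0
        = st.1.getD v 0 := by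
  induction L with
  | nil => intro st v _; rfl
  | cons w t ih =>
    intro st v hv
    simp only [List.foldl_cons]
    rw [ih _ v (fun h => hv (List.mem_cons_of_mem _ h))]
    exact PySem.Dict.getD_insert_of_ne _ _ _ (fun h => hv (h ▸ List.mem_cons_self ..))

-- loop 2 invariant: walking the ascending distinct values of T, acc is always the number of
-- elements of T strictly below the next value, so start[v] = countP (< v) T for every v
lemma loop2_main (T : List Int) (L : List Int) :
    ∀ (st : PySem.Dict Int Int) (acc : Int),
      L.Pairwise (· < ·) →
      (∀ v ∈ L, ((T.countP (fun x => decide (x < v))) : Int)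
          = acc + ((T.countP (fun x => decide (x < v) && decide (x ∈ L))) : Int)) →
      ∀ v ∈ L,
        ((L.foldl (fun (p : PySem.Dict Int Int × Int) w => (p.1.insert w p.2, p.2 + (T.count w : Int)))
            (st, acc)).1).getD v 0
          = ((T.countP (fun x => decide (x < v))) : Int) := by
  induction L with
  | nil => intro st acc _ _ v hv; simp at hv
  | cons w rest ih =>
    intro st acc hpw hinv v hv
    rcases List.pairwise_cons.mp hpw with ⟨hwrest, hrest⟩
    have hwnot : w ∉ rest := fun h => lt_irrefl w (hwrest w h)
    have hacc : ((T.countP (fun x => decide (x < w))) : Int) = acc := by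
      have h0 : T.countP (fun x => decide (x < w) && decide (x ∈ w :: rest)) = 0 := by
        apply List.countP_eq_zero.mpr
        intro x _
        simp only [Bool.and_eq_true, decide_eq_true_eq, not_and]
        intro hxw hmem
        rcases List.mem_cons.mp hmem with rfl | hmemr
        · exact absurd hxw (lt_irrefl _)
        · exact absurd hxw (not_lt.mpr (le_of_lt (hwrest x hmemr)))
      have h := hinv w (List.mem_cons_self ..)
      rw [h0] at h
      simpa using h
    simp only [List.foldl_cons]
    rcases List.mem_cons.mp hv with rfl | hvr
    · rw [loop2_getD_of_not_mem _ rest _ v hwnot]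
      simp only
      rw [PySem.Dict.getD_insert_self]
      exact hacc.symm
    · refine ih (st.insert w acc) (acc + (T.count w : Int)) hrest ?_ v hvr
      intro u hur
      have hwu : w < u := hwrest u hur
      have h := hinv u (List.mem_cons_of_mem _ hur)
      have hsplit : T.countP (fun x => decide (x < u) && decide (x ∈ w :: rest))
          = T.count w + T.countP (fun x => decide (x < u) && decide (x ∈ rest)) := by
        have hcg : T.countP (fun x => decide (x < u) && decide (x ∈ w :: rest))
            = T.countP (fun x => (decide (x < u) && decide (x = w))
                || (decide (x < u) && decide (x ∈ rest))) := by
          apply List.countP_congr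
          intro x _
          simp only [Bool.and_eq_true, Bool.or_eq_true, decide_eq_true_eq, List.mem_cons]
          tauto
        rw [hcg, countP_or_disjoint]
        · congr 1
          rw [List.count_eq_countP]
          apply List.countP_congr
          intro x _
          simp only [Bool.and_eq_true, decide_eq_true_eq, beq_iff_eq]
          constructor
          · exact fun hx => hx.2
          · intro hx
            exact ⟨by rw [hx]; exact hwu, hx⟩
        · intro x _
          simp only [Bool.and_eq_true, decide_eq_true_eq, not_and, and_imp]
          intro _ hxw _ hmem
          exact hwnot (hxw ▸ hmem)
      rw [h, hsplit]
      push_cast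
      ring

-- loop 3 invariant: after i elements, start[v] = countP (< v) T + (take i).count v; the running
-- max k accumulates |i - rank| with rank = chaosRank
lemma loop3_main (T : List Int) :
    ∀ (fuel m : Nat) (st : PySem.Dict Int Int) (k : Int),
      T.length ≤ m + fuel →
      (∀ v ∈ T, st.getD v 0 = ((T.countP (fun x => decide (x < v))) : Int)
          + (((T.take m).count v) : Int)) →
      ((PySem.List.pyRange (m : Int) (PySem.List.len T) 1).foldl
          (fun (p : PySem.Dict Int Int × Int) j =>
            (p.1.insert (PySem.List.pyGetD T j 0) (p.1.getD (PySem.List.pyGetD T j 0) 0 + 1),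
             if |j - p.1.getD (PySem.List.pyGetD T j 0) 0| > p.2
             then |j - p.1.getD (PySem.List.pyGetD T j 0) 0| else p.2))
          (st, k)).2
        = ((PySem.List.pyRange (m : Int) (PySem.List.len T) 1).map
            (fun j => |j - chaosRank T j|)).foldl max k := by
  intro fuel
  induction fuel with
  | zero =>
    intro m st k hle _
    rw [PySem.List.pyRange_one_eq_nil (by simp [PySem.List.len]; omega)]
    rfl
  | succ fuel ih =>
    intro m st k hle hst
    by_cases hm : m < T.length
    · have hmi : (m : Int) < PySem.List.len T := by simp [PySem.List.len]; omega
      rw [PySem.List.pyRange_one_cons hmi]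
      simp only [List.foldl_cons, List.map_cons]
      have htm : PySem.List.pyGetD T (m : Int) 0 = T[m] := by
        rw [PySem.List.pyGetD_natCast, List.getD_eq_getElem T 0 hm]
      have hrank : st.getD (PySem.List.pyGetD T (m : Int) 0) 0 = chaosRank T (m : Int) := by
        rw [htm, hst T[m] (List.getElem_mem hm)]
        unfold chaosRank
        rw [htm, Int.toNat_natCast]
      have hstep : ∀ (d : Int), (if d > k then d else k) = max k d := by intro d; omega
      rw [hrank, hstep]
      have hcast : (m : Int) + 1 = ((m + 1 : Nat) : Int) := by push_cast; ring
      rw [hcast]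
      rw [ih (m + 1) _ _ (by omega) ?_]
      intro v hv
      rw [PySem.Dict.getD_insert, htm]
      have htake : (T.take (m + 1)).count v
          = (T.take m).count v + if v = T[m] then 1 else 0 := by
        rw [List.take_add_one, List.getElem?_eq_getElem hm]
        simp only [Option.toList_some, List.count_append, List.count_cons, List.count_nil]
        by_cases hvt : v = T[m]
        · subst hvt; simp
        · simp [hvt, Ne.symm hvt]
      rw [htake]
      by_cases hvt : v = T[m]
      · subst hvt
        rw [if_pos rfl]
        unfold chaosRank
        rw [htm, Int.toNat_natCast]
        push_cast
        simp only [if_true]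
        omega
      · rw [if_neg hvt, hst v hv]
        simp [hvt]
    · rw [PySem.List.pyRange_one_eq_nil (by simp [PySem.List.len]; omega)]
      rfl

lemma chaos_index_alt_eq_fold (T : List Int) :
    chaos_index_alt T
      = ((PySem.List.pyRange 0 (PySem.List.len T) 1).map
          (fun j => |j - chaosRank T j|)).foldl max 0 := by
  unfold chaos_index_alt
  simp only [PySem.Dict.foldl_insert_getD_add_one_eq_counter, PySem.Dict.keys_counter,
    PySem.Dict.getD_counter]
  have hmemL : ∀ x : Int, x ∈ PySem.List.sorted (PySem.Set.ofList T) (fun v => v) ↔ x ∈ T := by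
    intro x
    rw [(PySem.List.sorted_perm (PySem.Set.ofList T) (fun v => v) false).mem_iff,
      PySem.Set.mem_ofList]
  have hst0 : ∀ v ∈ T,
      (((PySem.List.sorted (PySem.Set.ofList T) (fun v => v)).foldl
          (fun (p : PySem.Dict Int Int × Int) v => (p.1.insert v p.2, p.2 + (T.count v : Int)))
          (PySem.Dict.empty, 0)).1).getD v 0
        = ((T.countP (fun x => decide (x < v))) : Int) := by
    intro v hv
    refine loop2_main T _ PySem.Dict.empty 0 (PySem.List.sorted_ofList_pairwise_lt T) ?_ v
      ((hmemL v).mpr hv)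
    intro u _
    have : T.countP (fun x => decide (x < u)
          && decide (x ∈ PySem.List.sorted (PySem.Set.ofList T) (fun v => v)))
        = T.countP (fun x => decide (x < u)) := by
      apply List.countP_congr
      intro x hx
      simp [(hmemL x).mpr hx]
    rw [this]
    ring
  rw [PySem.List.enumerate_eq_map_pyRange T 0, List.foldl_map]
  exact loop3_main T T.length 0 _ 0 (by omega) (fun v hv => by rw [hst0 v hv]; simp)

-- ===== VERDICT (by name: the statement is the Claim_ definition above) =====
theorem chaos_index_spec : Claim_equal_chaos_index := by
  intro T _
  unfold Spec_chaos_index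
  rw [chaos_index_eq_fold, chaos_index_alt_eq_fold]
  congr 1
  apply List.map_congr_left
  intro i hi
  rcases PySem.List.mem_pyRange_one.mp hi with ⟨h0, hn⟩
  rw [countP_chaosPairs T i h0 hn]
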